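-- pv_equiv track=rewrite | github.com/asaf-b/Mansur-Rig | scripts/mansur/core/utility.py | removeNamespaceFromString
-- ===== SOURCE A (Python) =====
-- def removeNamespaceFromString(value):
-- 	tokens = value.split('|')
-- 	result = ''
-- 	for i, token in enumerate(tokens):
-- 		if i > 0:
-- 			result += '|'
-- 		result += token.split(':')[-1]
-- 	return result
-- ===== SOURCE B (Python) =====
-- def removeNamespaceFromString(value):
--     # Single left-to-right pass: keep characters; a ':' erases the chars
--     # accumulated since the last '|' (i.e. the namespace prefix just read).
--     out = []
--     for ch in value:
--         if ch == ':':
--             while out and out[-1] != '|':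
--                 out.pop()
--         else:
--             out.append(ch)
--     return ''.join(out)
-- ===== Notes on version B (the rewrite author's own statement) =====
-- stated objective: alternative
-- what changed: Replaced split-on-'|'/split-on-':'/rejoin with a single character-level pass that appends characters and, on ':', pops the accumulated chars back to the last '|'.
import Mathlib
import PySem

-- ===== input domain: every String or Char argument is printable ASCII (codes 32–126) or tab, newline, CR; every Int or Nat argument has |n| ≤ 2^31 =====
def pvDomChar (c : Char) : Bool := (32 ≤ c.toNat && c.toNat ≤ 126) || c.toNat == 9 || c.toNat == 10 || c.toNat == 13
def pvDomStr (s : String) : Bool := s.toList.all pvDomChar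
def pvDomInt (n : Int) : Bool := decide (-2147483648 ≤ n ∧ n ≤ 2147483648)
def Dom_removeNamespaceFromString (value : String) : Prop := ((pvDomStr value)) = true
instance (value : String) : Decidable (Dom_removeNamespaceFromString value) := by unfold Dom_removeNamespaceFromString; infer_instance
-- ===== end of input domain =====

-- B replaces A's split/loop/rejoin with a single character-level pass (append; on ':' pop back to the last '|'); same O(n) cost, different structure.

-- ===== PORT A =====
-- token.split(':') is never empty, so Python's [-1] always succeeds; pyGet? is `some` there and `.getD ""` is exact.
def removeNamespaceFromString (value : String) : String :=
  let tokens : List String := (PySem.Str.split? value "|").getD []  -- sep "|" ≠ "", so split? = some: getD is exact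
  (PySem.List.enumerate tokens).foldl
    (fun result it =>
      let result := if it.1 > 0 then result ++ "|" else result
      result ++ (PySem.List.pyGet? ((PySem.Str.split? it.2 ":").getD []) (-1)).getD "")
    ""

-- ===== PORT B =====
-- `out` is kept in reverse order: Python's append = cons, the pop-while loop = dropWhile from the head.
def removeNamespaceFromString_alt (value : String) : String :=
  String.ofList
    ((value.toList.foldl
        (fun out ch => if ch = ':' then out.dropWhile (· ≠ '|') else ch :: out)
        []).reverse)

-- ===== PRECONDITION & SPEC =====
def Spec_removeNamespaceFromString (value : String) (out : String) : Prop := out = removeNamespaceFromString_alt value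
instance (value : String) (out : String) : Decidable (Spec_removeNamespaceFromString value out) := by unfold Spec_removeNamespaceFromString; infer_instance

-- ===== CLAIM (what is proved, stated in full; the proofs are below) =====
def Claim_equal_removeNamespaceFromString : Prop := ∀ (value : String), Dom_removeNamespaceFromString value → Spec_removeNamespaceFromString value (removeNamespaceFromString value)

-- ===== LEMMAS AND PROOFS =====

-- split on a single character, returned as (first token, remaining tokens)
def split1 (c : Char) : List Char → List Char × List (List Char)
  | [] => ([], [])
  | x :: xs =>
      let p := split1 c xs
      if x = c then ([], p.1 :: p.2) else (x :: p.1, p.2)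

-- the chars of the last ':'-token of t, reversed suffix after the last ':'
def lastC (t : List Char) : List Char := (t.reverse.takeWhile (· ≠ ':')).reverse

theorem splitOn_go_spec (c : Char) :
    ∀ (fuel : Nat) (l cur : List Char) (acc : List (List Char)), l.length ≤ fuel →
      PySem.Chars.splitOn.go [c] fuel l cur acc
        = acc.reverse ++ (cur.reverse ++ (split1 c l).1) :: (split1 c l).2 := by
  intro fuel
  induction fuel with
  | zero =>
      intro l cur acc h
      have hl : l = [] := List.eq_nil_of_length_eq_zero (Nat.le_zero.mp h)
      subst hl
      simp [PySem.Chars.splitOn.go, split1]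
  | succ n ih =>
      intro l cur acc h
      cases l with
      | nil => simp [PySem.Chars.splitOn.go, split1]
      | cons x rest =>
          by_cases hx : x = c
          · subst hx
            have : [x].isPrefixOf (x :: rest) = true := by simp [List.isPrefixOf]
            simp only [PySem.Chars.splitOn.go, this, if_pos, List.length_cons,
              List.length_nil, List.drop_succ_cons, List.drop_zero]
            rw [ih rest [] (cur.reverse :: acc) (by simpa using Nat.lt_succ_iff.mp (by simpa using h))]
            simp [split1]
          · have hpre : [c].isPrefixOf (x :: rest) = false := by
              simp [List.isPrefixOf]; exact fun hc => (hx hc.symm).elim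
            simp only [PySem.Chars.splitOn.go, hpre]
            rw [ih rest (x :: cur) acc (by simpa using Nat.lt_succ_iff.mp (by simpa using h))]
            simp [split1, hx]

theorem splitOn_eq_split1 (c : Char) (l : List Char) :
    PySem.Chars.splitOn l [c] = (split1 c l).1 :: (split1 c l).2 := by
  unfold PySem.Chars.splitOn
  rw [splitOn_go_spec c (l.length + 1) l [] [] (by omega)]
  simp

theorem split1_of_not_mem (c : Char) (l : List Char) (h : c ∉ l) : split1 c l = (l, []) := by
  induction l with
  | nil => simp [split1]
  | cons x xs ih =>
      have hx : x ≠ c := fun hc => h (hc ▸ List.mem_cons_self)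
      have := ih (fun hm => h (List.mem_cons_of_mem _ hm))
      simp [split1, hx, this]

theorem split1_snd_ne_nil (c : Char) (l : List Char) (h : c ∈ l) : (split1 c l).2 ≠ [] := by
  induction l with
  | nil => simp at h
  | cons x xs ih =>
      by_cases hx : x = c
      · simp [split1, hx]
      · have hm : c ∈ xs := by
          rcases List.mem_cons.mp h with h1 | h2
          · exact absurd h1.symm hx
          · exact h2
        simp [split1, hx]
        exact ih hm

theorem split1_not_mem (c : Char) (l : List Char) :
    c ∉ (split1 c l).1 ∧ ∀ t ∈ (split1 c l).2, c ∉ t := by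
  induction l with
  | nil => simp [split1]
  | cons x xs ih =>
      by_cases hx : x = c
      · subst hx
        simpa [split1] using ⟨ih.1, ih.2⟩
      · refine ⟨?_, by simpa [split1, hx] using ih.2⟩
        simp [split1, hx]
        exact ⟨fun hc => hx hc.symm, ih.1⟩

theorem split1_join (c : Char) (l : List Char) :
    (split1 c l).1 ++ (split1 c l).2.flatMap (fun t => c :: t) = l := by
  induction l with
  | nil => simp [split1]
  | cons x xs ih =>
      by_cases hx : x = c
      · subst hx; simp [split1, ih]
      · simp [split1, hx, ih]

-- takeWhile helpers
theorem takeWhile_append_sep (c : Char) (xs ys : List Char) :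
    ((xs ++ c :: ys).takeWhile (· ≠ c)) = xs.takeWhile (· ≠ c) := by
  induction xs with
  | nil => simp [List.takeWhile]
  | cons x t ih =>
      by_cases hx : x = c
      · simp [List.takeWhile, hx]
      · simp only [List.cons_append, List.takeWhile_cons, ne_eq, decide_not] at ih ⊢
        simp [hx, ih]

theorem takeWhile_append_of_mem (c : Char) (xs zs : List Char) (h : c ∈ xs) :
    ((xs ++ zs).takeWhile (· ≠ c)) = xs.takeWhile (· ≠ c) := by
  induction xs with
  | nil => simp at h
  | cons x t ih =>
      by_cases hx : x = c
      · simp [List.takeWhile, hx]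
      · have hm : c ∈ t := by
          rcases List.mem_cons.mp h with h1 | h2
          · exact absurd h1.symm hx
          · exact h2
        have := ih hm
        simp only [List.cons_append, List.takeWhile_cons, ne_eq, decide_not] at this ⊢
        simp [hx, this]

theorem takeWhile_eq_self_of_not_mem (c : Char) (xs : List Char) (h : c ∉ xs) :
    xs.takeWhile (· ≠ c) = xs := by
  rw [List.takeWhile_eq_self_iff]
  intro y hy
  simp only [ne_eq, decide_eq_true_eq]
  intro hc
  exact h (hc ▸ hy)

-- last token of split1, in closed form
theorem toks_getLast (c : Char) (t : List Char) :
    ((split1 c t).1 :: (split1 c t).2).getLast? = some ((t.reverse.takeWhile (· ≠ c)).reverse) := by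
  induction t with
  | nil => simp [split1]
  | cons x xs ih =>
      by_cases hx : x = c
      · subst hx
        have hrw : (x :: xs).reverse = xs.reverse ++ x :: ([] : List Char) := by simp
        rw [hrw, takeWhile_append_sep]
        simpa [split1, List.getLast?_cons_cons] using ih
      · by_cases hm : c ∈ xs
        · have hne := split1_snd_ne_nil c xs hm
          have hrw : (x :: xs).reverse = xs.reverse ++ [x] := by simp
          rw [hrw, takeWhile_append_of_mem c _ _ (by simpa using hm)]
          obtain ⟨a, as, h2⟩ := List.exists_cons_of_ne_nil hne
          have lhs1 : ((split1 c (x :: xs)).1 :: (split1 c (x :: xs)).2)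
              = (x :: (split1 c xs).1) :: (split1 c xs).2 := by simp [split1, hx]
          rw [lhs1, h2]
          have hih := ih
          rw [h2] at hih
          simpa [List.getLast?_cons_cons] using hih
        · have hall : c ∉ x :: xs := by
            intro hc
            rcases List.mem_cons.mp hc with h1 | h2
            · exact hx h1.symm
            · exact hm h2
          rw [split1_of_not_mem c _ hall]
          have hself : ((x :: xs).reverse.takeWhile (· ≠ c)) = (x :: xs).reverse :=
            takeWhile_eq_self_of_not_mem c _ (fun hc => hall (List.mem_reverse.mp hc))
          simp only [List.reverse_cons, ne_eq, decide_not] at hself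
          simp [hself]

-- B's loop step (the port's lambda, named for the proofs)
def stepB (out : List Char) (ch : Char) : List Char :=
  if ch = ':' then out.dropWhile (· ≠ '|') else ch :: out

theorem dropWhile_append_no (p acc : List Char) (hp : '|' ∉ p)
    (hacc : acc = [] ∨ acc.head? = some '|') :
    (p ++ acc).dropWhile (· ≠ '|') = acc := by
  induction p with
  | nil =>
      rcases hacc with h | h
      · subst h; simp
      · cases acc with
        | nil => simp
        | cons a l =>
            simp only [List.head?_cons, Option.some.injEq] at h
            simp [h]
  | cons x t ih =>
      have hx : x ≠ '|' := fun hc => hp (hc ▸ List.mem_cons_self)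
      have := ih (fun hm => hp (List.mem_cons_of_mem _ hm))
      simpa [List.dropWhile, hx] using this

theorem tokB (t : List Char) (ht : '|' ∉ t) :
    ∀ (p acc : List Char), '|' ∉ p → ':' ∉ p → (acc = [] ∨ acc.head? = some '|') →
      t.foldl stepB (p ++ acc) = (t.reverse ++ p).takeWhile (· ≠ ':') ++ acc := by
  induction t with
  | nil =>
      intro p acc hp hpc _
      have h := takeWhile_eq_self_of_not_mem ':' p hpc
      simp only [ne_eq, decide_not] at h
      simp [h]
  | cons x xs ih =>
      intro p acc hp hpc hacc
      have hxs : '|' ∉ xs := fun hm => ht (List.mem_cons_of_mem _ hm)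
      by_cases hx : x = ':'
      · subst hx
        have h1 : stepB (p ++ acc) ':' = acc := by
          simp only [stepB, if_pos]
          exact dropWhile_append_no p acc hp hacc
        simp only [List.foldl_cons, h1]
        have hihs := ih hxs [] acc (by simp) (by simp) hacc
        simp only [List.nil_append, List.append_nil] at hihs
        rw [hihs]
        rw [show ((':' :: xs).reverse ++ p) = xs.reverse ++ ':' :: p from by simp,
           takeWhile_append_sep]
      · have hxp : x ≠ '|' := fun hc => ht (hc ▸ List.mem_cons_self)
        have h1 : stepB (p ++ acc) x = (x :: p) ++ acc := by simp [stepB, hx]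
        simp only [List.foldl_cons, h1]
        rw [ih hxs (x :: p) acc
            (fun hm => (List.mem_cons.mp hm).elim (fun h => hxp h.symm) hp)
            (fun hm => (List.mem_cons.mp hm).elim (fun h => hx h.symm) hpc) hacc]
        rw [show ((x :: xs).reverse ++ p) = xs.reverse ++ x :: p from by simp]

theorem wholeB (tl : List (List Char)) (htl : ∀ t ∈ tl, '|' ∉ t) :
    ∀ (acc : List Char),
      (tl.flatMap (fun t => '|' :: t)).foldl stepB acc
        = (tl.flatMap (fun t => '|' :: lastC t)).reverse ++ acc := by
  induction tl with
  | nil => intro acc; simp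
  | cons t tl ih =>
      intro acc
      have ht : '|' ∉ t := htl t List.mem_cons_self
      have h1 : stepB acc '|' = '|' :: acc := by simp [stepB]
      have h2 : t.foldl stepB ('|' :: acc) = (lastC t).reverse ++ '|' :: acc := by
        have := tokB t ht [] ('|' :: acc) (by simp) (by simp) (Or.inr rfl)
        simpa [lastC] using this
      simp only [List.flatMap_cons, List.cons_append, List.foldl_cons, h1,
        List.foldl_append, h2]
      rw [ih (fun u hu => htl u (List.mem_cons_of_mem _ hu)) ((lastC t).reverse ++ '|' :: acc)]
      simp

-- A's token extraction: token.split(':')[-1]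
def extractA (t : String) : String :=
  (PySem.List.pyGet? ((PySem.Str.split? t ":").getD []) (-1)).getD ""

theorem pyGet_neg_one {α : Type} (xs : List α) (h : xs ≠ []) :
    PySem.List.pyGet? xs (-1) = xs.getLast? := by
  have hlen : 1 ≤ xs.length := List.length_pos_of_ne_nil h
  unfold PySem.List.pyGet? PySem.List.pyIdx?
  rw [if_neg (by omega), if_pos (by push_cast; omega)]
  simp [List.getLast?_eq_getElem?]

theorem split?_toks (t : String) (c : Char) :
    PySem.Str.split? t (String.ofList [c])
      = some (((split1 c t.toList).1 :: (split1 c t.toList).2).map String.ofList) := by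
  unfold PySem.Str.split? PySem.Chars.split?
  rw [show (String.ofList [c]).toList = [c] from by simp]
  rw [if_neg (by simp)]
  rw [splitOn_eq_split1]
  simp

theorem extract_eq (t : String) : extractA t = String.ofList (lastC t.toList) := by
  unfold extractA
  rw [show (":" : String) = String.ofList [':'] from by decide, split?_toks t ':']
  simp only [Option.getD_some]
  rw [pyGet_neg_one _ (by simp)]
  rw [List.getLast?_map, toks_getLast]
  simp [lastC]

-- A's loop body (the port's lambda, named for the proofs)
def fA (result : String) (it : Int × String) : String :=
  (if it.1 > 0 then result ++ "|" else result) ++ extractA it.2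

theorem foldA (ts : List String) :
    ∀ (k : Int), 1 ≤ k → ∀ (r : String),
      ((PySem.List.enumerate ts k).foldl fA r).toList
        = r.toList ++ ts.flatMap (fun t => '|' :: lastC t.toList) := by
  induction ts with
  | nil => intro k _ r; simp [PySem.List.enumerate]
  | cons t ts ih =>
      intro k hk r
      rw [show PySem.List.enumerate (t :: ts) k = (k, t) :: PySem.List.enumerate ts (k + 1)
        from by simp [PySem.List.enumerate]]
      simp only [List.foldl_cons]
      rw [ih (k + 1) (by omega)]
      have h1 : fA r (k, t) = (r ++ "|") ++ extractA t := by
        simp only [fA]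
        rw [if_pos (by omega)]
      rw [h1, extract_eq]
      simp [String.toList_append]

theorem listA (value : String) :
    (removeNamespaceFromString value).toList
      = lastC (split1 '|' value.toList).1
        ++ (split1 '|' value.toList).2.flatMap (fun t => '|' :: lastC t) := by
  have htok : (PySem.Str.split? value "|").getD ([] : List String)
      = ((split1 '|' value.toList).1 :: (split1 '|' value.toList).2).map String.ofList := by
    rw [show ("|" : String) = String.ofList ['|'] from by decide, split?_toks]
    rfl
  have e1 : removeNamespaceFromString value
      = (PySem.List.enumerate
          (((split1 '|' value.toList).1 :: (split1 '|' value.toList).2).map String.ofList)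
          0).foldl fA "" := by
    unfold removeNamespaceFromString fA extractA
    rw [← htok]
  rw [e1]
  rw [show (((split1 '|' value.toList).1 :: (split1 '|' value.toList).2).map String.ofList)
      = String.ofList (split1 '|' value.toList).1 :: ((split1 '|' value.toList).2.map String.ofList)
    from by simp]
  rw [show PySem.List.enumerate
        (String.ofList (split1 '|' value.toList).1 :: ((split1 '|' value.toList).2.map String.ofList)) 0
      = (0, String.ofList (split1 '|' value.toList).1)
          :: PySem.List.enumerate ((split1 '|' value.toList).2.map String.ofList) 1
    from by simp [PySem.List.enumerate]]
  simp only [List.foldl_cons]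
  rw [show fA "" (0, String.ofList (split1 '|' value.toList).1)
      = "" ++ extractA (String.ofList (split1 '|' value.toList).1) from by simp [fA]]
  rw [foldA _ 1 (by norm_num)]
  rw [extract_eq]
  simp [List.flatMap_map]

theorem listB (value : String) :
    (removeNamespaceFromString_alt value).toList
      = lastC (split1 '|' value.toList).1
        ++ (split1 '|' value.toList).2.flatMap (fun t => '|' :: lastC t) := by
  have e1 : (removeNamespaceFromString_alt value).toList
      = (value.toList.foldl stepB []).reverse := by
    unfold removeNamespaceFromString_alt stepB
    simp
  rw [e1]
  have hsplit := split1_join '|' value.toList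
  conv_lhs => rw [← hsplit]
  rw [List.foldl_append]
  have h1 : (split1 '|' value.toList).1.foldl stepB [] = (lastC (split1 '|' value.toList).1).reverse := by
    have := tokB (split1 '|' value.toList).1 (split1_not_mem '|' value.toList).1
      [] [] (by simp) (by simp) (Or.inl rfl)
    simpa [lastC] using this
  rw [h1]
  rw [wholeB (split1 '|' value.toList).2 (split1_not_mem '|' value.toList).2]
  simp

-- ===== VERDICT (by name: the statement is the Claim_ definition above) =====
theorem removeNamespaceFromString_spec : Claim_equal_removeNamespaceFromString := by
  intro value _
  unfold Spec_removeNamespaceFromString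
  exact String.toList_inj.mp ((listA value).trans (listB value).symm)
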